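-- pv_equiv track=rewrite | github.com/jkaunert/PyZwaver | pyzwaver/application_node.py | BitsToSetWithOffset
-- ===== SOURCE A (Python) =====
-- def BitsToSetWithOffset(x, offset):
--     out = set()
--     pos = 0
--     while x:
--         if (x & 1) == 1:
--             out.add(pos + offset)
--         pos += 1
--         x >>= 1
--     return out
-- ===== SOURCE B (Python) =====
-- def BitsToSetWithOffset(x, offset):
--     out = set()
--     while x:
--         low = x & (x ^ (x - 1))          # isolate the lowest set bit
--         out.add(low.bit_length() - 1 + offset)
--         x ^= low                         # clear it
--     return out
-- ===== Notes on version B (the rewrite author's own statement) =====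
-- stated objective: alternative
-- what changed: B iterates once per SET bit, isolating the lowest set bit with x & (x ^ (x - 1)) and reading its index from bit_length(), instead of A's bit-by-bit shift loop that maintains an incremental position counter and tests every bit position.
import Mathlib
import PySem

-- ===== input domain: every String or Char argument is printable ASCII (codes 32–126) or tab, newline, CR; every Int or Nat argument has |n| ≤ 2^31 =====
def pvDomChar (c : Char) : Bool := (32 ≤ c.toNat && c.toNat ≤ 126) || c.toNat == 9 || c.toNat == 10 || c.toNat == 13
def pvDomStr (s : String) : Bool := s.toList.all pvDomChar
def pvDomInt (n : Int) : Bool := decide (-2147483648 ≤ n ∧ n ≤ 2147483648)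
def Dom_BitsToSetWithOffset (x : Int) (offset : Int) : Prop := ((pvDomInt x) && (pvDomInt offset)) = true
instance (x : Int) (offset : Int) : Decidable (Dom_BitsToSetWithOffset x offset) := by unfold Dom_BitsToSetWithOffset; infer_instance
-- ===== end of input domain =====

-- B isolates each lowest set bit (x & (x ^ (x-1))) and reads its index via bit_length,
-- instead of A's bit-by-bit shift loop with a position counter; alternative algorithm, same result.


-- ===== PORT A =====
-- 'while x:' is ported as 'if 0 < x': on x < 0 the Python loop never terminates
-- (excluded by Pre_), so the guard only makes the same computation total.
def pvLoopA (x pos offset : Int) (out : List Int) : List Int :=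
  if 0 < x then
    pvLoopA (x >>> (1 : Nat)) (pos + 1) offset
      (if PySem.Int.band x 1 = 1 then PySem.Set.add out (pos + offset) else out)
  else out
termination_by x.toNat
decreasing_by rw [Int.shiftRight_eq_div_pow]; norm_num; omega

def BitsToSetWithOffset (x : Int) (offset : Int) : List Int :=
  pvLoopA x 0 offset []

-- ===== PORT B =====
-- Nat-level facts needed by pvLoopB's termination (the loop clears one set bit per step).
theorem pvXor_dd (a b : Nat) : (2*a) ^^^ (2*b) = 2*(a ^^^ b) := by
  have := Nat.bitwise_bit (f := bne) (a := false) (m := a) (b := false) (n := b)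
  simpa [Nat.bit, HXor.hXor, Nat.xor] using this

theorem pvXor_uu (a b : Nat) : (2*a+1) ^^^ (2*b+1) = 2*(a ^^^ b) := by
  have := Nat.bitwise_bit (f := bne) (a := true) (m := a) (b := true) (n := b)
  simpa [Nat.bit, HXor.hXor, Nat.xor] using this

theorem pvXor_ud (a b : Nat) : (2*a+1) ^^^ (2*b) = 2*(a ^^^ b)+1 := by
  have := Nat.bitwise_bit (f := bne) (a := true) (m := a) (b := false) (n := b)
  simpa [Nat.bit, HXor.hXor, Nat.xor] using this

theorem pvXor_du (a b : Nat) : (2*a) ^^^ (2*b+1) = 2*(a ^^^ b)+1 := by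
  have := Nat.bitwise_bit (f := bne) (a := false) (m := a) (b := true) (n := b)
  simpa [Nat.bit, HXor.hXor, Nat.xor] using this

theorem pvAnd_du (a b : Nat) : (2*a) &&& (2*b+1) = 2*(a &&& b) := by
  have := Nat.bitwise_bit (f := and) (a := false) (m := a) (b := true) (n := b)
  simpa [Nat.bit, HAnd.hAnd, Nat.land] using this

theorem pvAnd_uu (a b : Nat) : (2*a+1) &&& (2*b+1) = 2*(a &&& b)+1 := by
  have := Nat.bitwise_bit (f := and) (a := true) (m := a) (b := true) (n := b)
  simpa [Nat.bit, HAnd.hAnd, Nat.land] using this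

theorem pvLow_odd (n : Nat) (h : n % 2 = 1) : n &&& (n ^^^ (n-1)) = 1 := by
  obtain ⟨j, rfl⟩ : ∃ j, n = 2*j+1 := ⟨n/2, by omega⟩
  have h1 : 2*j+1-1 = 2*j := by omega
  rw [h1, pvXor_ud, Nat.xor_self]
  have := pvAnd_uu j 0
  simpa using this

theorem pvLow_even (k : Nat) (h : 0 < k) : (2*k) &&& ((2*k) ^^^ (2*k-1)) = 2*(k &&& (k ^^^ (k-1))) := by
  have h1 : 2*k-1 = 2*(k-1)+1 := by omega
  rw [h1, pvXor_du]
  have h2 : k ^^^ (k-1+1-1) = k ^^^ (k-1) := by norm_num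
  rw [pvAnd_du]

theorem pvXor_one_of_odd (n : Nat) (h : n % 2 = 1) : n ^^^ 1 = n - 1 := by
  obtain ⟨j, rfl⟩ : ∃ j, n = 2*j+1 := ⟨n/2, by omega⟩
  have := pvXor_uu j 0
  simpa using this

theorem pvClear_lt (n : Nat) (h : 0 < n) : n ^^^ (n &&& (n ^^^ (n-1))) < n := by
  induction n using Nat.strong_induction_on with
  | _ n ih =>
    rcases Nat.even_or_odd n with he | ho
    · obtain ⟨k, rfl⟩ : ∃ k, n = 2*k := by obtain ⟨k, hk⟩ := he; exact ⟨k, by omega⟩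
      have hk : 0 < k := by omega
      rw [pvLow_even k hk, pvXor_dd]
      have := ih k (by omega) hk
      omega
    · have ho' : n % 2 = 1 := Nat.odd_iff.mp ho
      rw [pvLow_odd n ho', pvXor_one_of_odd n ho']
      omega

-- termination fact for pvLoopB, cited in its decreasing_by
theorem pvLoopB_dec (x : Int) (h : 0 < x) :
    (PySem.Int.bxor x (PySem.Int.band x (PySem.Int.bxor x (x - 1)))).toNat < x.toNat := by
  obtain ⟨n, rfl⟩ : ∃ n : Nat, x = (n : Int) := ⟨x.toNat, by omega⟩
  have hn : 0 < n := by exact_mod_cast h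
  have h1 : (n : Int) - 1 = ((n - 1 : Nat) : Int) := by omega
  rw [h1, PySem.Int.bxor_natCast, PySem.Int.band_natCast, PySem.Int.bxor_natCast]
  simpa using pvClear_lt n hn

-- 'while x:' ported as 'if 0 < x' for the same reason as in pvLoopA.
def pvLoopB (x offset : Int) (out : List Int) : List Int :=
  if h : 0 < x then
    let low := PySem.Int.band x (PySem.Int.bxor x (x - 1))
    pvLoopB (PySem.Int.bxor x low) offset
      (PySem.Set.add out ((PySem.Int.bitLength low : Int) - 1 + offset))
  else out
termination_by x.toNat
decreasing_by exact pvLoopB_dec x h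

def BitsToSetWithOffset_alt (x : Int) (offset : Int) : List Int :=
  pvLoopB x offset []

-- ===== PRECONDITION & SPEC =====
-- Pre_ excludes x < 0: there Python's A (and B) loop forever ('x >>= 1' stalls at -1), so A never returns.
def Pre_BitsToSetWithOffset (x : Int) (offset : Int) : Prop := 0 ≤ x
instance (x : Int) (offset : Int) : Decidable (Pre_BitsToSetWithOffset x offset) := by unfold Pre_BitsToSetWithOffset; infer_instance
def pvWitness_BitsToSetWithOffset : Int × Int := (13, -2)

def Spec_BitsToSetWithOffset (x : Int) (offset : Int) (out : List Int) : Prop := out = BitsToSetWithOffset_alt x offset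
instance (x : Int) (offset : Int) (out : List Int) : Decidable (Spec_BitsToSetWithOffset x offset out) := by unfold Spec_BitsToSetWithOffset; infer_instance

-- ===== CLAIM (what is proved, stated in full; the proofs are below) =====
def Claim_equal_BitsToSetWithOffset : Prop := ∀ (x : Int) (offset : Int), Dom_BitsToSetWithOffset x offset → Pre_BitsToSetWithOffset x offset → Spec_BitsToSetWithOffset x offset (BitsToSetWithOffset x offset)

-- ===== LEMMAS AND PROOFS =====

-- ascending list of set-bit indices of n (proof-side specification of both loops)
def pvIdx (n : Nat) : List Nat :=
  if h : n = 0 then [] else (if n % 2 = 1 then [0] else []) ++ (pvIdx (n/2)).map (·+1)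
termination_by n
decreasing_by omega

theorem pvIdx_zero : pvIdx 0 = [] := by unfold pvIdx; simp

theorem pvIdx_double (m : Nat) : pvIdx (2*m) = (pvIdx m).map (·+1) := by
  rcases Nat.eq_zero_or_pos m with rfl | hm
  · simp [pvIdx_zero]
  · rw [pvIdx]
    have h0 : ¬ (2*m = 0) := by omega
    have h1 : (2*m) % 2 = 0 := by omega
    have h2 : 2*m/2 = m := by omega
    simp [h0, h1, h2]

theorem pvIdx_odd_eq (n : Nat) (h : n % 2 = 1) : pvIdx n = 0 :: (pvIdx (n/2)).map (·+1) := by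
  rw [pvIdx]
  have h0 : ¬ (n = 0) := by omega
  simp [h0, h]

-- the low-bit step: the lowest set bit is a power of two whose exponent heads pvIdx
theorem pvKey (n : Nat) (h : 0 < n) :
    ∃ t, n &&& (n ^^^ (n-1)) = 2^t ∧ pvIdx n = t :: pvIdx (n ^^^ (n &&& (n ^^^ (n-1)))) := by
  induction n using Nat.strong_induction_on with
  | _ n ih =>
    rcases Nat.even_or_odd n with he | ho
    · obtain ⟨k, rfl⟩ : ∃ k, n = 2*k := by obtain ⟨k, hk⟩ := he; exact ⟨k, by omega⟩
      have hk : 0 < k := by omega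
      obtain ⟨t, ht, hidx⟩ := ih k (by omega) hk
      refine ⟨t+1, ?_, ?_⟩
      · rw [pvLow_even k hk, ht]; ring
      · rw [pvLow_even k hk, pvXor_dd, pvIdx_double, hidx, pvIdx_double]
        simp
    · have ho' : n % 2 = 1 := Nat.odd_iff.mp ho
      refine ⟨0, by simpa using pvLow_odd n ho', ?_⟩
      rw [pvLow_odd n ho', pvXor_one_of_odd n ho', pvIdx_odd_eq n ho']
      have hnn : n - 1 = 2*(n/2) := by omega
      rw [hnn, pvIdx_double]

theorem pvBitLength_pow (t : Nat) : PySem.Int.bitLength ((2^t : Nat) : Int) = t + 1 := by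
  induction t with
  | zero => norm_num; decide
  | succ t ih =>
    rw [PySem.Int.bitLength_natCast (by positivity)]
    have h : 2^(t+1)/2 = 2^t := by
      rw [pow_succ]; omega
    rw [h, ih]

theorem pvShift_natCast (n : Nat) : ((n : Int) >>> (1:Nat)) = ((n/2 : Nat) : Int) := by
  rw [Int.shiftRight_eq_div_pow]; norm_num

theorem pvLoopA_spec (n : Nat) (pos offset : Int) (out : List Int) :
    pvLoopA (n : Int) pos offset out
      = (pvIdx n).foldl (fun o (i : Nat) => PySem.Set.add o (pos + (i : Int) + offset)) out := by
  induction n using Nat.strong_induction_on generalizing pos out with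
  | _ n ih =>
    rcases Nat.eq_zero_or_pos n with rfl | hn
    · rw [pvLoopA]; simp [pvIdx_zero]
    · rw [pvLoopA]
      have hpos : (0:Int) < (n:Int) := by exact_mod_cast hn
      have hband : PySem.Int.band (n : Int) 1 = ((n &&& 1 : Nat) : Int) := by
        exact_mod_cast PySem.Int.band_natCast n 1
      have hA1 : (n &&& 1 : Nat) = n % 2 := Nat.and_one_is_mod n
      rw [if_pos hpos, pvShift_natCast, hband, hA1]
      rw [ih (n/2) (by omega)]
      -- align the folds: the (+1) in the index cancels the (+1) in pos
      have hf : (fun (o : List Int) (i : Nat) => PySem.Set.add o ((pos+1) + (i : Int) + offset))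
          = (fun (o : List Int) (i : Nat) => PySem.Set.add o (pos + ((i+1 : Nat) : Int) + offset)) := by
        funext o i; congr 1; push_cast; ring
      rcases Nat.even_or_odd n with he | ho
      · have h0 : n % 2 = 0 := Nat.even_iff.mp he
        have hne : ¬ (((n % 2 : Nat) : Int) = 1) := by omega
        obtain ⟨k, rfl⟩ : ∃ k, n = 2*k := ⟨n/2, by omega⟩
        have h2 : 2*k/2 = k := by omega
        rw [if_neg hne, h2, pvIdx_double, List.foldl_map, hf]
      · have h1 : n % 2 = 1 := Nat.odd_iff.mp ho
        have heq : (((n % 2 : Nat) : Int) = 1) := by omega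
        rw [if_pos heq, pvIdx_odd_eq n h1]
        simp only [List.foldl_cons, List.foldl_map, hf]
        simp

theorem pvLoopB_spec (n : Nat) (offset : Int) (out : List Int) :
    pvLoopB (n : Int) offset out
      = (pvIdx n).foldl (fun o (i : Nat) => PySem.Set.add o ((i : Int) + offset)) out := by
  induction n using Nat.strong_induction_on generalizing out with
  | _ n ih =>
    rcases Nat.eq_zero_or_pos n with rfl | hn
    · rw [pvLoopB]; simp [pvIdx_zero]
    · rw [pvLoopB]
      have hpos : (0:Int) < (n:Int) := by exact_mod_cast hn
      have h1 : (n : Int) - 1 = ((n - 1 : Nat) : Int) := by omega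
      obtain ⟨t, hlow, hidx⟩ := pvKey n hn
      have hlowI : PySem.Int.band (n : Int) (PySem.Int.bxor (n : Int) ((n : Int) - 1))
          = ((2^t : Nat) : Int) := by
        rw [h1, PySem.Int.bxor_natCast, PySem.Int.band_natCast, hlow]
      have hxorI : PySem.Int.bxor (n : Int) ((2^t : Nat) : Int)
          = ((n ^^^ (n &&& (n ^^^ (n-1))) : Nat) : Int) := by
        rw [PySem.Int.bxor_natCast, hlow]
      rw [dif_pos hpos]
      simp only [hlowI, hxorI]
      rw [ih _ (by exact pvClear_lt n hn)]
      rw [hidx]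
      simp only [List.foldl_cons, pvBitLength_pow]
      congr 2
      push_cast; ring

-- ===== VERDICT (by name: the statement is the Claim_ definition above) =====
theorem BitsToSetWithOffset_spec : Claim_equal_BitsToSetWithOffset := by
  intro x offset _ hpre
  have hx : (0:Int) ≤ x := hpre
  obtain ⟨n, rfl⟩ : ∃ n : Nat, x = (n : Int) := ⟨x.toNat, by omega⟩
  unfold Spec_BitsToSetWithOffset BitsToSetWithOffset BitsToSetWithOffset_alt
  rw [pvLoopA_spec, pvLoopB_spec]
  congr 1
  funext o i
  congr 1
  ring
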